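-- pv_equiv track=rewrite | github.com/esther-poniatowski/hermeneia | src/hermeneia/rules/linkage/semicolon_connector.py | _semicolon_offset
-- ===== SOURCE A (Python) =====
-- def _semicolon_offset(text: str, boundary_index: int) -> int:
--     """Semicolon offset."""
--     seen = 0
--     for index, char in enumerate(text):
--         if char != ";":
--             continue
--         seen += 1
--         if seen == boundary_index:
--             return index
--     return max(0, text.find(";"))
-- ===== SOURCE B (Python) =====
-- def _semicolon_offset(text: str, boundary_index: int) -> int:
--     """Semicolon offset."""
--     parts = text.split(";")
--     n = len(parts) - 1  # number of semicolons
--     if n == 0: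
--         return 0
--     k = boundary_index if 1 <= boundary_index <= n else 1
--     return len(";".join(parts[:k]))
-- ===== Notes on version B (the rewrite author's own statement) =====
-- stated objective: faster
-- what changed: B never scans characters itself: it splits the text on ';' and computes the k-th semicolon's index as the length of ';'.join of the first k segments (clamping an out-of-range boundary_index to k=1), replacing A's per-character enumerate loop with a running counter plus a separate text.find fallback.
import Mathlib
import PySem

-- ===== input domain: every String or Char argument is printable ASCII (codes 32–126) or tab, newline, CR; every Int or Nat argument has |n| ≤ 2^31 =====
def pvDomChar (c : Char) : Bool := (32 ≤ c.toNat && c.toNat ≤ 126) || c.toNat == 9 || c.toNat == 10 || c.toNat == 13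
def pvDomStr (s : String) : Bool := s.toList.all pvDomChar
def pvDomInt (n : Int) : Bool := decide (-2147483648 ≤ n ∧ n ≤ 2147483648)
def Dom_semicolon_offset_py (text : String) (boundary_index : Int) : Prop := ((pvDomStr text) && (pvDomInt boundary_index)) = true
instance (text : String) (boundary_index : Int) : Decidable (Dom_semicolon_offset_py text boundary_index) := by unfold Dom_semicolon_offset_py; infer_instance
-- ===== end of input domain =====

-- B splits the text on ';' and answers as the length of ';'.join of the first k segments, replacing A's per-character counter loop (measurably faster in Python, where split/join run in C).

-- ===== PORT A =====
-- the for-loop over enumerate(text) with early return: index, seen counter, target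
def semiLoop : List Char → Nat → Int → Int → Option Nat
  | [], _, _, _ => none
  | c :: cs, i, seen, b =>
    if c ≠ ';' then semiLoop cs (i + 1) seen b
    else if seen + 1 = b then some i
    else semiLoop cs (i + 1) (seen + 1) b

def semicolon_offset_py (text : String) (boundary_index : Int) : Int :=
  match semiLoop text.toList 0 0 boundary_index with
  | some i => (i : Int)
  | none => max 0 (PySem.Str.find text ";")

-- ===== PORT B =====
def semicolon_offset_py_alt (text : String) (boundary_index : Int) : Int :=
  let parts := PySem.Chars.splitOn text.toList [';']          -- text.split(";")
  let n : Int := (parts.length : Int) - 1                      -- number of semicolons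
  if n = 0 then 0
  else
    let k : Int := if 1 ≤ boundary_index ∧ boundary_index ≤ n then boundary_index else 1
    ((PySem.Chars.join [';'] (parts.take k.toNat)).length : Int)  -- len(";".join(parts[:k]))

-- ===== PRECONDITION & SPEC =====
def Spec_semicolon_offset_py (text : String) (boundary_index : Int) (out : Int) : Prop := out = semicolon_offset_py_alt text boundary_index
instance (text : String) (boundary_index : Int) (out : Int) : Decidable (Spec_semicolon_offset_py text boundary_index out) := by unfold Spec_semicolon_offset_py; infer_instance

-- ===== CLAIM (what is proved, stated in full; the proofs are below) =====
def Claim_equal_semicolon_offset_py : Prop := ∀ (text : String) (boundary_index : Int), Dom_semicolon_offset_py text boundary_index → Spec_semicolon_offset_py text boundary_index (semicolon_offset_py text boundary_index)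

-- ===== LEMMAS AND PROOFS =====

-- proof-side index table: the semicolon positions of the text (used only by the lemmas)
def semiPositions : List Char → Nat → List Nat
  | [], _ => []
  | c :: cs, i => if c = ';' then i :: semiPositions cs (i + 1) else semiPositions cs (i + 1)

-- proof-side reference split on ';' (plain structural recursion, no fuel)
def splitP : List Char → List (List Char)
  | [] => [[]]
  | c :: cs =>
    if c = ';' then [] :: splitP cs
    else match splitP cs with
      | [] => [[c]]
      | p :: ps => (c :: p) :: ps

theorem splitP_ne_nil (cs : List Char) : splitP cs ≠ [] := by
  cases cs with
  | nil => simp [splitP]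
  | cons c cs =>
    by_cases hc : c = ';'
    · simp [splitP, hc]
    · rw [splitP, if_neg hc]
      cases splitP cs <;> simp

-- headCons x ls prepends x to the first block of ls
def headCons (x : List Char) : List (List Char) → List (List Char)
  | [] => [x]
  | p :: ps => (x ++ p) :: ps

theorem go_eq_splitP (fuel : Nat) : ∀ (l cur : List Char) (acc : List (List Char)),
    l.length ≤ fuel →
    PySem.Chars.splitOn.go [';'] fuel l cur acc = acc.reverse ++ headCons cur.reverse (splitP l) := by
  induction fuel with
  | zero =>
    intro l cur acc h
    have : l = [] := List.eq_nil_of_length_eq_zero (Nat.le_zero.mp h)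
    subst this
    simp [PySem.Chars.splitOn.go, splitP, headCons]
  | succ fuel ih =>
    intro l cur acc h
    cases l with
    | nil => simp [PySem.Chars.splitOn.go, splitP, headCons]
    | cons c rest =>
      by_cases hc : c = ';'
      · have hpre : List.isPrefixOf [';'] (c :: rest) = true := by simp [List.isPrefixOf, hc]
        rw [PySem.Chars.splitOn.go, if_pos hpre]
        have : List.drop [';'].length (c :: rest) = rest := by simp
        rw [this, ih rest [] (cur.reverse :: acc) (by simpa using Nat.lt_succ_iff.mp (by simpa using h))]
        rw [splitP, if_pos hc]
        obtain ⟨p, ps, hps⟩ : ∃ p ps, splitP rest = p :: ps := by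
          cases hx : splitP rest with
          | nil => exact absurd hx (splitP_ne_nil rest)
          | cons p ps => exact ⟨p, ps, rfl⟩
        simp [hps, headCons]
      · have hpre : List.isPrefixOf [';'] (c :: rest) = false := by
          simp [List.isPrefixOf]
          exact fun h' => absurd h'.symm hc
        rw [PySem.Chars.splitOn.go, if_neg (by simp [hpre])]
        rw [ih rest (c :: cur) acc (by simpa using Nat.lt_succ_iff.mp (by simpa using h))]
        rw [splitP, if_neg hc]
        cases hx : splitP rest with
        | nil => exact absurd hx (splitP_ne_nil rest)
        | cons p ps => simp [headCons]

theorem splitOn_eq_splitP (cs : List Char) : PySem.Chars.splitOn cs [';'] = splitP cs := by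
  rw [PySem.Chars.splitOn, go_eq_splitP (cs.length + 1) cs [] [] (by omega)]
  obtain ⟨p, ps, hps⟩ : ∃ p ps, splitP cs = p :: ps := by
    cases hx : splitP cs with
    | nil => exact absurd hx (splitP_ne_nil cs)
    | cons p ps => exact ⟨p, ps, rfl⟩
  simp [hps, headCons]

-- shift lemma for the position table
theorem semiPositions_shift (cs : List Char) : ∀ i, semiPositions cs i = (semiPositions cs 0).map (· + i) := by
  induction cs with
  | nil => intro i; simp [semiPositions]
  | cons c cs ih =>
    intro i
    by_cases hc : c = ';'
    · simp only [semiPositions, if_pos hc, ih (i + 1), ih 1, List.map_cons, List.map_map]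
      congr 1
      · omega
      · apply List.map_congr_left
        intro x _
        simp
        omega
    · simp only [semiPositions, if_neg hc, ih (i + 1), ih 1, List.map_map]
      apply List.map_congr_left
      intro x _
      simp
      omega

-- the split has one more block than there are semicolons
theorem splitP_length (cs : List Char) : (splitP cs).length = (semiPositions cs 0).length + 1 := by
  induction cs with
  | nil => simp [splitP, semiPositions]
  | cons c cs ih =>
    by_cases hc : c = ';'
    · simp [splitP, semiPositions, hc, ih, semiPositions_shift cs 1]
    · rw [splitP, if_neg hc, semiPositions, if_neg hc, semiPositions_shift cs 1]
      cases hx : splitP cs with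
      | nil => exact absurd hx (splitP_ne_nil cs)
      | cons p ps => rw [hx] at ih; simpa using ih

-- the k-th semicolon position is the length of ';'.join of the first k blocks
theorem splitP_join_len (cs : List Char) : ∀ (k : Nat), 1 ≤ k → k ≤ (semiPositions cs 0).length →
    (semiPositions cs 0)[k - 1]? = some ((PySem.Chars.join [';'] ((splitP cs).take k)).length) := by
  induction cs with
  | nil => intro k h1 h2; simp [semiPositions] at h2; omega
  | cons c cs ih =>
    intro k h1 h2
    obtain ⟨p, ps, hsp⟩ : ∃ p ps, splitP cs = p :: ps := by
      cases hx : splitP cs with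
      | nil => exact absurd hx (splitP_ne_nil cs)
      | cons p ps => exact ⟨p, ps, rfl⟩
    by_cases hc : c = ';'
    · rw [semiPositions, if_pos hc, semiPositions_shift cs 1] at h2 ⊢
      rw [splitP, if_pos hc]
      match k, h1 with
      | 1, _ =>
        simp [PySem.Chars.join, List.intercalate]
      | (j + 2), _ =>
        have hj2 : j + 1 ≤ (semiPositions cs 0).length := by
          simp at h2; omega
        have hIH := ih (j + 1) (by omega) hj2
        simp only [Nat.add_sub_cancel] at hIH
        obtain ⟨q, qs, hq⟩ : ∃ q qs, (splitP cs).take (j + 1) = q :: qs :=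
          ⟨p, ps.take j, by rw [hsp, List.take_succ_cons]⟩
        rw [List.take_succ_cons, hq]
        have hjoin : PySem.Chars.join [';'] ([] :: q :: qs) = [] ++ [';'] ++ PySem.Chars.join [';'] (q :: qs) :=
          PySem.Chars.join_cons_cons _ _ _ _
        rw [hjoin, ← hq]
        have hidx : j + 2 - 1 = j + 1 := by omega
        rw [hidx, List.getElem?_cons_succ, List.getElem?_map]
        rw [hq] at hIH ⊢
        cases hg : (semiPositions cs 0)[j]? with
        | none => rw [hg] at hIH; simp at hIH
        | some v =>
          rw [hg] at hIH
          simp at hIH ⊢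
          omega
    · rw [semiPositions, if_neg hc, semiPositions_shift cs 1] at h2 ⊢
      rw [splitP, if_neg hc, hsp]
      have h2' : k ≤ (semiPositions cs 0).length := by simpa using h2
      have hIH := ih k h1 h2'
      rw [hsp] at hIH
      match k, h1 with
      | (j + 1), _ =>
        rw [List.take_succ_cons] at hIH ⊢
        have hjoin : ∀ (q : List Char) (qs : List (List Char)),
            PySem.Chars.join [';'] ((c :: q) :: qs) = c :: PySem.Chars.join [';'] (q :: qs) := by
          intro q qs
          cases qs with
          | nil => simp [PySem.Chars.join, List.intercalate]
          | cons r rs =>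
            rw [PySem.Chars.join_cons_cons, PySem.Chars.join_cons_cons]
            simp
        rw [hjoin]
        rw [List.getElem?_map]
        cases hg : (semiPositions cs 0)[j + 1 - 1]? with
        | none => rw [hg] at hIH; simp at hIH
        | some v =>
          rw [hg] at hIH
          simp at hIH ⊢
          omega

-- A's loop returns exactly the (b - seen)-th entry of the position table (1-based), if any.
theorem semiLoop_eq (cs : List Char) (i : Nat) (seen b : Int) :
    semiLoop cs i seen b =
      if 1 ≤ b - seen then (semiPositions cs i)[(b - seen - 1).toNat]? else none := by
  induction cs generalizing i seen with
  | nil => simp [semiLoop, semiPositions]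
  | cons c cs ih =>
    by_cases hc : c = ';'
    · by_cases hb : seen + 1 = b
      · have h1 : (1:Int) ≤ b - seen := by omega
        have h0 : (b - seen - 1).toNat = 0 := by omega
        simp [semiLoop, semiPositions, hc, hb, h1, h0]
      · rw [semiLoop, semiPositions, if_pos hc, if_neg (not_not_intro hc), if_neg hb, ih]
        by_cases h1 : (1:Int) ≤ b - (seen + 1)
        · have h1' : (1:Int) ≤ b - seen := by omega
          have hk : (b - seen - 1).toNat = (b - (seen + 1) - 1).toNat + 1 := by omega
          simp [h1, h1', hk]
        · by_cases h2 : (1:Int) ≤ b - seen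
          · have : b = seen + 1 := by omega
            exact absurd this.symm hb
          · simp [h1, h2]
    · rw [semiLoop, semiPositions, if_pos hc, if_neg hc]
      exact ih (i + 1) seen

theorem semiPositions_nil_iff (cs : List Char) (i : Nat) :
    semiPositions cs i = [] ↔ ';' ∉ cs := by
  induction cs generalizing i with
  | nil => simp [semiPositions]
  | cons c cs ih =>
    by_cases hc : c = ';'
    · simp [semiPositions, hc]
    · simp [semiPositions, hc, ih (i + 1), Ne.symm hc]

-- head of the table: first semicolon index, with minimality
theorem semiPositions_head (cs : List Char) (i p : Nat)
    (h : (semiPositions cs i).head? = some p) :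
    i ≤ p ∧ cs[p - i]? = some ';' ∧ ∀ j, j < p - i → cs[j]? ≠ some ';' := by
  induction cs generalizing i with
  | nil => simp [semiPositions] at h
  | cons c cs ih =>
    by_cases hc : c = ';'
    · rw [semiPositions, if_pos hc] at h
      simp at h
      subst h
      refine ⟨le_refl _, by simp [hc], ?_⟩
      intro j hj
      omega
    · rw [semiPositions, if_neg hc] at h
      obtain ⟨h1, h2, h3⟩ := ih (i + 1) h
      have hip : i + 1 ≤ p := h1
      refine ⟨by omega, ?_, ?_⟩
      · have : p - i = (p - (i + 1)) + 1 := by omega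
        rw [this]
        simpa using h2
      · intro j hj
        cases j with
        | zero => simp [hc]
        | succ j =>
          have : j < p - (i + 1) := by omega
          simpa using h3 j this

theorem singleton_prefix_iff (a : Char) (l : List Char) : [a] <+: l ↔ l.head? = some a := by
  constructor
  · rintro ⟨t, rfl⟩; rfl
  · intro h
    cases l with
    | nil => simp at h
    | cons x xs => simp at h; subst h; exact ⟨xs, rfl⟩

theorem singleton_infix_iff (a : Char) (l : List Char) : [a] <:+: l ↔ a ∈ l := by
  constructor
  · rintro ⟨s, t, rfl⟩; simp
  · intro h
    obtain ⟨s, t, hl, -⟩ := List.eq_append_cons_of_mem h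
    exact ⟨s, t, by rw [hl]; simp⟩

-- text.find(";") equals the head of the position table (or -1)
theorem find_semi (s : List Char) :
    PySem.Chars.find s [';'] =
      match (semiPositions s 0).head? with
      | some p => (p : Int)
      | none => -1 := by
  cases hh : (semiPositions s 0).head? with
  | none =>
    have hnil : semiPositions s 0 = [] := by
      cases hsp : semiPositions s 0 with
      | nil => rfl
      | cons p t => rw [hsp] at hh; simp at hh
    have hmem : ';' ∉ s := (semiPositions_nil_iff s 0).mp hnil
    have : ¬ [';'] <:+: s := by
      rw [singleton_infix_iff]; exact hmem
    simpa using (PySem.Chars.find_eq_neg_one_iff s [';']).mpr this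
  | some p =>
    obtain ⟨-, h2, h3⟩ := semiPositions_head s 0 p hh
    simp only [Nat.sub_zero] at h2 h3
    have hmem : ';' ∈ s := by
      have := List.getElem?_eq_some_iff.mp h2
      obtain ⟨hlt, he⟩ := this
      exact he ▸ List.getElem_mem hlt
    have hinf : [';'] <:+: s := (singleton_infix_iff ';' s).mpr hmem
    have hge : 0 ≤ PySem.Chars.find s [';'] := (PySem.Chars.find_nonneg_iff s [';']).mpr hinf
    obtain ⟨hpre, hmin⟩ := PySem.Chars.find_spec (s := s) (sub := [';']) hge
    set f := (PySem.Chars.find s [';']).toNat with hf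
    have hfh : (s.drop f).head? = some ';' := (singleton_prefix_iff ';' _).mp hpre
    rw [List.head?_drop] at hfh
    have hfp : f = p := by
      rcases Nat.lt_trichotomy f p with h | h | h
      · exact absurd hfh (h3 f h)
      · exact h
      · have : [';'] <+: s.drop p := by
          rw [singleton_prefix_iff, List.head?_drop]; exact h2
        exact absurd this (hmin p h)
    have : PySem.Chars.find s [';'] = (f : Int) := by omega
    rw [this, hfp]

theorem semicolon_offset_py_eq (text : String) (b : Int) :
    semicolon_offset_py text b = semicolon_offset_py_alt text b := by
  unfold semicolon_offset_py semicolon_offset_py_alt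
  rw [semiLoop_eq, splitOn_eq_splitP]
  have hfind : PySem.Str.find text ";" = PySem.Chars.find text.toList [';'] := by
    rw [PySem.Str.find_eq]; rfl
  simp only [sub_zero, splitP_length, hfind, find_semi]
  cases hP : semiPositions text.toList 0 with
  | nil =>
    simp
  | cons q t =>
    have hne : ¬ ((((q :: t).length + 1 : Nat) : Int) - 1 = 0) := by
      intro h
      simp at h
      have hnn : (0:Int) ≤ (t.length : Int) := Int.natCast_nonneg _
      omega
    rw [if_neg hne]
    by_cases hb : 1 ≤ b ∧ b ≤ (((q :: t).length + 1 : Nat) : Int) - 1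
    · -- in-range boundary_index: both give the b-th semicolon position
      have hb' : 1 ≤ b ∧ b ≤ ((q :: t).length : Int) := by push_cast at hb ⊢; omega
      have h1 : 1 ≤ b.toNat := by omega
      have h2 : b.toNat ≤ (semiPositions text.toList 0).length := by
        rw [hP]; push_cast at hb'; omega
      have hJ := splitP_join_len text.toList b.toNat h1 h2
      rw [hP] at hJ
      rw [if_pos hb, if_pos hb'.1]
      have hidx : (b - 1).toNat = b.toNat - 1 := by omega
      rw [hidx, hJ]
    · -- out-of-range boundary_index: A falls back to the first semicolon, B clamps k to 1
      have hJ := splitP_join_len text.toList 1 (le_refl 1) (by rw [hP]; simp)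
      rw [hP] at hJ
      simp only [Nat.sub_self, List.getElem?_cons_zero, Option.some.injEq] at hJ
      rw [if_neg hb]
      have hA : (if 1 ≤ b then (q :: t)[(b - 1).toNat]? else none) = none := by
        by_cases h : 1 ≤ b
        · rw [if_pos h]
          apply List.getElem?_eq_none
          push_cast at hb
          omega
        · rw [if_neg h]
      rw [hA]
      have h1 : (1 : Int).toNat = 1 := rfl
      rw [h1, ← hJ]
      simp

-- ===== VERDICT (by name: the statement is the Claim_ definition above) =====
theorem semicolon_offset_py_spec : Claim_equal_semicolon_offset_py := by
  intro text boundary_index _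
  exact semicolon_offset_py_eq text boundary_index
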